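-- pv_equiv track=rewrite | github.com/sunxiaoye0116/republic_scripts | scripts/conf_generator/switch.py | gen_switch
-- ===== SOURCE A (Python) =====
-- def gen_switch(n_lrack=2, n_prack=5, n_plink=8, n_llink=2, p_port=24, c_port=11, lrid=1, dpid=55960):
--     """
--
--     :param n_lrack: number of logical racks
--     :param n_prack: number of physical racks
--     :param n_plink: number of physical ocs links per physical rack
--     :param n_llink: number of physical ocs links per logical rack
--     :param p_port: starting port on tor
--     :param c_port: starting port on ocs
--     :param dpid: starting dpid
--     :return: dictionary of switch
--     """
--     ret = []
--     assert n_plink >= n_llink * n_lrack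
--     lr_offset = 0
--     c_port_offset = 0
--
--     for pr in range(0, n_prack):
--         p_port_offset = 0
--         for lr in range(0, n_lrack):
--             for llr in range(0, n_llink):
--                 ret.append(
--                     {"tor_phy": dpid + pr,
--                      "tor_log": lrid + lr_offset,
--                      "port_tor": p_port + p_port_offset,
--                      "port_ocs": c_port + c_port_offset + lr * n_llink + llr})
--                 p_port_offset += 1
--             lr_offset += 1
--         c_port_offset += n_plink
--     return ret
-- ===== SOURCE B (Python) =====
-- KEYS = ("tor_phy", "tor_log", "port_tor", "port_ocs")
--
--
-- def _row(tor_phy, tor_log, port_tor, port_ocs):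
--     return dict(zip(KEYS, (tor_phy, tor_log, port_tor, port_ocs)))
--
--
-- def gen_switch(n_lrack=2, n_prack=5, n_plink=8, n_llink=2, p_port=24, c_port=11, lrid=1, dpid=55960):
--     assert n_plink >= n_llink * n_lrack
--     P, L, K = max(n_prack, 0), max(n_lrack, 0), max(n_llink, 0)
--     out = []
--     for t in range(P * L * K):
--         pr, rest = divmod(t, L * K)
--         lr, llr = divmod(rest, K)
--         out.append(_row(dpid + pr,
--                         lrid + pr * L + lr,
--                         p_port + lr * K + llr,
--                         c_port + pr * n_plink + lr * K + llr))
--     return out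
-- ===== Notes on version B (the rewrite author's own statement) =====
-- stated objective: alternative
-- what changed: The three nested loops with mutable offset accumulators are replaced by a single flat loop over one combined index whose rack/link coordinates are recovered arithmetically by divmod, each field computed in closed form and each record built by a row helper zipping a fixed key tuple with its values.
import Mathlib
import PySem

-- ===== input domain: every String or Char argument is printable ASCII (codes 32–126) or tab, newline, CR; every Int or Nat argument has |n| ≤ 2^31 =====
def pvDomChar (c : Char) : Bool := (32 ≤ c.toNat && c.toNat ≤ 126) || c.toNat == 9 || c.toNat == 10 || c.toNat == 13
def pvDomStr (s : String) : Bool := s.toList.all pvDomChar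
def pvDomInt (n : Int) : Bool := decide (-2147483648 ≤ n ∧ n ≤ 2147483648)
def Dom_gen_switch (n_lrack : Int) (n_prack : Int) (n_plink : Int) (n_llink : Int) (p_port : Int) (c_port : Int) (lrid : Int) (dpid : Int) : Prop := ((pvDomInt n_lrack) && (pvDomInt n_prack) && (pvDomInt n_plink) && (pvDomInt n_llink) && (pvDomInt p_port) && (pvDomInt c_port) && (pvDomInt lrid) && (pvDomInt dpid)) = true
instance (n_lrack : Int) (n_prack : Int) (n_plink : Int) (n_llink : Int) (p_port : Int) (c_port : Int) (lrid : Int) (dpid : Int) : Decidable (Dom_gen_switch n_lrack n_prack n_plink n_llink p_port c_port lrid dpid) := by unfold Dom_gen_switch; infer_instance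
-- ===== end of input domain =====

-- ===== PORT A =====
-- B replaces A's three nested loops and mutable offsets by one flat loop over a combined index, decoded by divmod (objective: alternative).
def gen_switch (n_lrack : Int) (n_prack : Int) (n_plink : Int) (n_llink : Int) (p_port : Int) (c_port : Int) (lrid : Int) (dpid : Int) : List (List (String × Int)) :=
  -- ret = []; lr_offset = 0; c_port_offset = 0; three nested for-loops appending dicts and bumping the offsets
  let res :=
    (PySem.List.pyRange 0 n_prack 1).foldl
      (fun (st : List (List (String × Int)) × Int × Int) pr =>
        let st2 :=
          (PySem.List.pyRange 0 n_lrack 1).foldl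
            (fun (st2 : List (List (String × Int)) × Int × Int) lr =>
              let st3 :=
                (PySem.List.pyRange 0 n_llink 1).foldl
                  (fun (st3 : List (List (String × Int)) × Int) llr =>
                    (st3.1 ++ [[("tor_phy", dpid + pr), ("tor_log", lrid + st2.2.1),
                                ("port_tor", p_port + st3.2),
                                ("port_ocs", c_port + st.2.2 + lr * n_llink + llr)]],
                     st3.2 + 1))
                  (st2.1, st2.2.2)
              (st3.1, st2.2.1 + 1, st3.2))
            (st.1, st.2.1, 0)
        (st2.1, st2.2.1, st.2.2 + n_plink))
      ([], 0, 0)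
  res.1

-- ===== PORT B =====
-- B-side helpers: KEYS and _row (dict(zip(KEYS, values)))
def pvKeys : List String := ["tor_phy", "tor_log", "port_tor", "port_ocs"]
def pvRow (tor_phy tor_log port_tor port_ocs : Int) : List (String × Int) :=
  List.zip pvKeys [tor_phy, tor_log, port_tor, port_ocs]

def gen_switch_alt (n_lrack : Int) (n_prack : Int) (n_plink : Int) (n_llink : Int) (p_port : Int) (c_port : Int) (lrid : Int) (dpid : Int) : List (List (String × Int)) :=
  -- P, L, K = max(...); one flat loop over range(P*L*K); pr,rest = divmod(t, L*K); lr,llr = divmod(rest, K)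
  let P := max n_prack 0
  let L := max n_lrack 0
  let K := max n_llink 0
  (PySem.List.pyRange 0 (P * L * K) 1).foldl
    (fun (out : List (List (String × Int))) t =>
      let pr := PySem.Int.floordiv t (L * K)
      let rest := PySem.Int.mod t (L * K)
      let lr := PySem.Int.floordiv rest K
      let llr := PySem.Int.mod rest K
      out ++ [pvRow (dpid + pr) (lrid + pr * L + lr) (p_port + lr * K + llr)
                    (c_port + pr * n_plink + lr * K + llr)])
    []

-- ===== PRECONDITION & SPEC =====
-- Pre_ excludes exactly the inputs where A's `assert n_plink >= n_llink * n_lrack` raises AssertionError.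
def Pre_gen_switch (n_lrack : Int) (n_prack : Int) (n_plink : Int) (n_llink : Int) (p_port : Int) (c_port : Int) (lrid : Int) (dpid : Int) : Prop :=
  n_llink * n_lrack ≤ n_plink
instance (n_lrack : Int) (n_prack : Int) (n_plink : Int) (n_llink : Int) (p_port : Int) (c_port : Int) (lrid : Int) (dpid : Int) : Decidable (Pre_gen_switch n_lrack n_prack n_plink n_llink p_port c_port lrid dpid) := by unfold Pre_gen_switch; infer_instance
def pvWitness_gen_switch : Int × Int × Int × Int × Int × Int × Int × Int := (2, 5, 8, 2, 24, 11, 1, 55960)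
def Spec_gen_switch (n_lrack : Int) (n_prack : Int) (n_plink : Int) (n_llink : Int) (p_port : Int) (c_port : Int) (lrid : Int) (dpid : Int) (out : List (List (String × Int))) : Prop := out = gen_switch_alt n_lrack n_prack n_plink n_llink p_port c_port lrid dpid
instance (n_lrack : Int) (n_prack : Int) (n_plink : Int) (n_llink : Int) (p_port : Int) (c_port : Int) (lrid : Int) (dpid : Int) (out : List (List (String × Int))) : Decidable (Spec_gen_switch n_lrack n_prack n_plink n_llink p_port c_port lrid dpid out) := by unfold Spec_gen_switch; infer_instance

-- ===== CLAIM (what is proved, stated in full; the proofs are below) =====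
def Claim_equal_gen_switch : Prop := ∀ (n_lrack : Int) (n_prack : Int) (n_plink : Int) (n_llink : Int) (p_port : Int) (c_port : Int) (lrid : Int) (dpid : Int), Dom_gen_switch n_lrack n_prack n_plink n_llink p_port c_port lrid dpid → Pre_gen_switch n_lrack n_prack n_plink n_llink p_port c_port lrid dpid → Spec_gen_switch n_lrack n_prack n_plink n_llink p_port c_port lrid dpid (gen_switch n_lrack n_prack n_plink n_llink p_port c_port lrid dpid)

-- ===== LEMMAS AND PROOFS =====

-- innermost loop of A: appends one entry per llr and bumps p_port_offset by 1
theorem pv_inner {α : Type} (e : Int → Int → α) (M : Nat) (ret : List α) (p0 : Int) :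
    ((List.range M).map (fun (k : Nat) => (k : Int))).foldl
      (fun (st : List α × Int) llr => (st.1 ++ [e st.2 llr], st.2 + 1)) (ret, p0)
    = (ret ++ (List.range M).map (fun (k : Nat) => e (p0 + (k : Int)) ((k : Int))), p0 + (M : Int)) := by
  induction M with
  | zero => simp
  | succ m ih =>
    rw [List.range_succ, List.map_append, List.foldl_append, ih]
    simp only [List.map_append, List.map_cons, List.map_nil, List.foldl_cons, List.foldl_nil,
      List.append_assoc, Prod.mk.injEq, true_and]
    push_cast; ring

-- middle loop of A: lr_offset advances by 1 per lr, p_port_offset by n_llink per lr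
theorem pv_middle {α : Type} (E : Int → Int → Int → Int → α) (M : Nat) (nll : Int) (ret : List α) (L0 : Int) :
    ((List.range M).map (fun (k : Nat) => (k : Int))).foldl
      (fun (st2 : List α × Int × Int) lr =>
         ((((List.range nll.toNat).map (fun (k : Nat) => (k : Int))).foldl
             (fun (st3 : List α × Int) llr => (st3.1 ++ [E lr st2.2.1 st3.2 llr], st3.2 + 1))
             (st2.1, st2.2.2)).1,
          st2.2.1 + 1,
          ((((List.range nll.toNat).map (fun (k : Nat) => (k : Int))).foldl
             (fun (st3 : List α × Int) llr => (st3.1 ++ [E lr st2.2.1 st3.2 llr], st3.2 + 1))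
             (st2.1, st2.2.2)).2)))
      (ret, L0, 0)
    = (ret ++ (List.range M).flatMap (fun (lk : Nat) =>
         (List.range nll.toNat).map (fun (k : Nat) =>
           E (lk : Int) (L0 + (lk : Int)) ((lk : Int) * (nll.toNat : Int) + (k : Int)) (k : Int))),
       L0 + (M : Int), (M : Int) * (nll.toNat : Int)) := by
  induction M with
  | zero => simp
  | succ m ih =>
    rw [List.range_succ, List.map_append, List.foldl_append, ih]
    simp only [List.map_cons, List.map_nil, List.foldl_cons, List.foldl_nil]
    rw [pv_inner]
    simp only [List.flatMap_append, List.flatMap_cons, List.flatMap_nil,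
      List.append_assoc, List.append_nil, Prod.mk.injEq]
    refine ⟨by trivial, by push_cast; ring, by push_cast; ring⟩

-- outer loop of A: c_port_offset advances by n_plink per pr, lr_offset by n_lrack per pr
theorem pv_outer {α : Type} (E : Int → Int → Int → Int → Int → Int → α) (M : Nat) (nlr nll npl : Int) (ret : List α) (L0 C0 : Int) :
    ((List.range M).map (fun (k : Nat) => (k : Int))).foldl
      (fun (st : List α × Int × Int) pr =>
         ((((List.range nlr.toNat).map (fun (k : Nat) => (k : Int))).foldl
             (fun (st2 : List α × Int × Int) lr =>
                ((((List.range nll.toNat).map (fun (k : Nat) => (k : Int))).foldl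
                   (fun (st3 : List α × Int) llr => (st3.1 ++ [E pr lr st2.2.1 st3.2 llr st.2.2], st3.2 + 1))
                   (st2.1, st2.2.2)).1,
                 st2.2.1 + 1,
                 ((((List.range nll.toNat).map (fun (k : Nat) => (k : Int))).foldl
                   (fun (st3 : List α × Int) llr => (st3.1 ++ [E pr lr st2.2.1 st3.2 llr st.2.2], st3.2 + 1))
                   (st2.1, st2.2.2)).2)))
             (st.1, st.2.1, 0)).1,
          (((List.range nlr.toNat).map (fun (k : Nat) => (k : Int))).foldl
             (fun (st2 : List α × Int × Int) lr =>
                ((((List.range nll.toNat).map (fun (k : Nat) => (k : Int))).foldl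
                   (fun (st3 : List α × Int) llr => (st3.1 ++ [E pr lr st2.2.1 st3.2 llr st.2.2], st3.2 + 1))
                   (st2.1, st2.2.2)).1,
                 st2.2.1 + 1,
                 ((((List.range nll.toNat).map (fun (k : Nat) => (k : Int))).foldl
                   (fun (st3 : List α × Int) llr => (st3.1 ++ [E pr lr st2.2.1 st3.2 llr st.2.2], st3.2 + 1))
                   (st2.1, st2.2.2)).2)))
             (st.1, st.2.1, 0)).2.1,
          st.2.2 + npl))
      (ret, L0, C0)
    = (ret ++ (List.range M).flatMap (fun (pk : Nat) =>
         (List.range nlr.toNat).flatMap (fun (lk : Nat) =>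
           (List.range nll.toNat).map (fun (k : Nat) =>
             E (pk : Int) (lk : Int) (L0 + (pk : Int) * (nlr.toNat : Int) + (lk : Int))
               ((lk : Int) * (nll.toNat : Int) + (k : Int)) (k : Int) (C0 + (pk : Int) * npl)))),
       L0 + (M : Int) * (nlr.toNat : Int), C0 + (M : Int) * npl) := by
  induction M with
  | zero => simp
  | succ m ih =>
    rw [List.range_succ, List.map_append, List.foldl_append, ih]
    simp only [List.map_cons, List.map_nil, List.foldl_cons, List.foldl_nil]
    rw [pv_middle (fun lr lro ppo llr => E (m : Int) lr lro ppo llr (C0 + (m : Int) * npl))]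
    simp only [List.flatMap_append, List.flatMap_cons, List.flatMap_nil,
      List.append_assoc, List.append_nil, Prod.mk.injEq]
    refine ⟨by trivial, by push_cast; ring, by push_cast; ring⟩

-- B's flat index decoded by divmod produces the nested enumeration (generic)
theorem pv_range_mul {α : Type} (f : Nat → Nat → α) (m n : Nat) :
    (List.range (m * n)).map (fun t => f (t / n) (t % n))
  = (List.range m).flatMap (fun i => (List.range n).map (fun j => f i j)) := by
  induction m with
  | zero => simp
  | succ m ih =>
    rw [Nat.succ_mul, List.range_add, List.map_append, List.map_map, List.range_succ,
      List.flatMap_append, ← ih]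
    simp only [List.flatMap_cons, List.flatMap_nil, List.append_nil]
    congr 1
    apply List.map_congr_left
    intro j hj
    simp only [List.mem_range] at hj
    have hn : 0 < n := by omega
    have h1 : (m * n + j) / n = m := by
      rw [Nat.mul_comm, Nat.mul_add_div hn, Nat.div_eq_of_lt hj]; omega
    have h2 : (m * n + j) % n = j := by
      rw [Nat.add_comm, Nat.add_mul_mod_self_right, Nat.mod_eq_of_lt hj]
    simp [Function.comp, h1, h2]

-- the double divmod decode, nested
theorem pv_flat {α : Type} (g : Int → Int → Int → α) (p l k : Nat) :
    (List.range (p * (l * k))).map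
      (fun t => g ((t / (l * k) : Nat) : Int) ((t % (l * k) / k : Nat) : Int) ((t % (l * k) % k : Nat) : Int))
  = (List.range p).flatMap (fun i => (List.range l).flatMap (fun j => (List.range k).map (fun r => g ((i : Nat) : Int) ((j : Nat) : Int) ((r : Nat) : Int)))) := by
  rw [pv_range_mul (fun a b => g (a : Int) ((b / k : Nat) : Int) ((b % k : Nat) : Int)) p (l * k)]
  apply List.flatMap_congr
  intro i _
  rw [pv_range_mul (fun a b => g (i : Int) (a : Int) (b : Int)) l k]

theorem gen_switch_spec : Claim_equal_gen_switch := by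
  intro n_lrack n_prack n_plink n_llink p_port c_port lrid dpid _ _
  unfold Spec_gen_switch gen_switch gen_switch_alt
  simp only [PySem.List.pyRange_one, Int.sub_zero, zero_add]
  rw [pv_outer (fun pr lr lro ppo llr co =>
        [("tor_phy", dpid + pr), ("tor_log", lrid + lro), ("port_tor", p_port + ppo),
         ("port_ocs", c_port + co + lr * n_llink + llr)])]
  -- B side: turn the fold into a map, then decode twice
  rw [PySem.List.foldl_append_singleton_eq_map]
  have hP : max n_prack 0 = ((n_prack.toNat : Int)) := by omega
  have hL : max n_lrack 0 = ((n_lrack.toNat : Int)) := by omega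
  have hK : max n_llink 0 = ((n_llink.toNat : Int)) := by omega
  rw [hP, hL, hK]
  have hPLK : (((n_prack.toNat : Int)) * ((n_lrack.toNat : Int)) * ((n_llink.toNat : Int))).toNat
      = n_prack.toNat * (n_lrack.toNat * n_llink.toNat) := by
    rw [← Nat.cast_mul, ← Nat.cast_mul, Int.toNat_natCast, Nat.mul_assoc]
  rw [hPLK, List.map_map]
  have hfd : ∀ t : Nat, PySem.Int.floordiv (t : Int) ((n_lrack.toNat : Int) * (n_llink.toNat : Int))
      = ((t / (n_lrack.toNat * n_llink.toNat) : Nat) : Int) := by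
    intro t; rw [← Nat.cast_mul]; exact PySem.Int.floordiv_natCast _ _
  have hmd : ∀ t : Nat, PySem.Int.mod (t : Int) ((n_lrack.toNat : Int) * (n_llink.toNat : Int))
      = ((t % (n_lrack.toNat * n_llink.toNat) : Nat) : Int) := by
    intro t; rw [← Nat.cast_mul]; exact PySem.Int.mod_natCast _ _
  simp only [Function.comp_def, hfd, hmd, PySem.Int.floordiv_natCast, PySem.Int.mod_natCast,
    pvRow, pvKeys, List.zip, List.zipWith]
  rw [pv_flat (fun pr lr llr =>
        [("tor_phy", dpid + pr), ("tor_log", lrid + pr * (n_lrack.toNat : Int) + lr),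
         ("port_tor", p_port + lr * (n_llink.toNat : Int) + llr),
         ("port_ocs", c_port + pr * n_plink + lr * (n_llink.toNat : Int) + llr)])
      n_prack.toNat n_lrack.toNat n_llink.toNat]
  simp only [List.nil_append]
  apply List.flatMap_congr
  intro pk _
  apply List.flatMap_congr
  intro lk hlk
  apply List.map_congr_left
  intro j hj
  simp only [List.mem_range] at hlk hj
  have h1 : ((n_lrack.toNat : Int)) = n_lrack := by omega
  have h2 : ((n_llink.toNat : Int)) = n_llink := by omega
  simp only [h1, h2]
  ring_nf
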